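-- pv_equiv track=rewrite | github.com/btemovska/-IntroductionToProgrammingInPython | Lab24.6.py | is_list_odd
-- ===== SOURCE A (Python) =====
-- def is_list_odd(my_list):
--     x_list = []
--     for x in my_list:
--         if x % 2 != 0:
--             x_list.append('odd')
--         else:
--             x_list.append('even')
--     if x_list.__contains__('even'):
--         z = 'neither'
--     else:
--         z = 'all odd'
--     return z
-- ===== SOURCE B (Python) =====
-- def is_list_odd(my_list):
--     return 'all odd' if all(x % 2 != 0 for x in my_list) else 'neither'
-- ===== Notes on version B (the rewrite author's own statement) =====
-- stated objective: simpler
-- what changed: Replaces the build-a-label-list-then-membership-test two-pass structure with a single short-circuiting all() parity test and no intermediate list.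
import Mathlib
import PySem

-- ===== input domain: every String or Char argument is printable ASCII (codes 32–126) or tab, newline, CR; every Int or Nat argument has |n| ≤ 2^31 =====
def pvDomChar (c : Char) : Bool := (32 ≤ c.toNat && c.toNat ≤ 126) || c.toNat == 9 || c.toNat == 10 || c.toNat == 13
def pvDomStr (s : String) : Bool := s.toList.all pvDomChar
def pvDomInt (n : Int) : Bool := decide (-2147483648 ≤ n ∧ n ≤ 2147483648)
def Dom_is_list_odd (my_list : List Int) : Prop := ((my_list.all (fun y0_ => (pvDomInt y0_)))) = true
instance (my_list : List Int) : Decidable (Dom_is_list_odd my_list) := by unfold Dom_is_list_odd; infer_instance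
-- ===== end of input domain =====

-- ===== PORT A =====
-- A: builds a parallel 'odd'/'even' label list, then returns 'neither' iff it contains 'even'.
def is_list_odd (my_list : List Int) : String :=
  let x_list := my_list.foldl (fun acc x =>
    if PySem.Int.mod x 2 ≠ 0 then acc ++ ["odd"] else acc ++ ["even"]) []
  if x_list.contains "even" then "neither" else "all odd"

-- ===== PORT B =====
-- B: single short-circuiting pass, no intermediate list.
def is_list_odd_alt (my_list : List Int) : String :=
  if my_list.all (fun x => PySem.Int.mod x 2 != 0) then "all odd" else "neither"

-- ===== PRECONDITION & SPEC =====
def Spec_is_list_odd (my_list : List Int) (out : String) : Prop := out = is_list_odd_alt my_list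
instance (my_list : List Int) (out : String) : Decidable (Spec_is_list_odd my_list out) := by unfold Spec_is_list_odd; infer_instance

-- ===== CLAIM (what is proved, stated in full; the proofs are below) =====
def Claim_equal_is_list_odd : Prop := ∀ (my_list : List Int), Dom_is_list_odd my_list → Spec_is_list_odd my_list (is_list_odd my_list)

-- ===== LEMMAS AND PROOFS =====

-- ===== VERDICT (by name: the statement is the Claim_ definition above) =====
-- the label list built from accumulator acc contains "even" iff acc does or some x is even
lemma labels_contain_even (l : List Int) (acc : List String) :
    (l.foldl (fun acc x =>
      if PySem.Int.mod x 2 ≠ 0 then acc ++ ["odd"] else acc ++ ["even"]) acc).contains "even"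
      = (acc.contains "even" || l.any (fun x => !(PySem.Int.mod x 2 != 0))) := by
  induction l generalizing acc with
  | nil => simp
  | cons x xs ih =>
    rw [List.foldl_cons, ih, List.any_cons]
    rcases Int.emod_two_eq x with h | h <;>
      simp [PySem.Int.mod_eq_emod_of_pos (show (0:Int) < 2 by norm_num), h, Bool.or_assoc]

theorem is_list_odd_spec : Claim_equal_is_list_odd := by
  intro l _
  unfold Spec_is_list_odd is_list_odd is_list_odd_alt
  simp only [labels_contain_even, List.contains_nil, Bool.false_or]
  by_cases h : l.any (fun x => !(PySem.Int.mod x 2 != 0)) <;>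
    simp_all [List.all_eq_not_any_not]
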